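-- pv_equiv track=rewrite | github.com/MatthewScholefield/mycroft-light | mycroft/util/log.py | _shorten_mod
-- ===== SOURCE A (Python) =====
-- def _shorten_mod(mod_name):
--     def is_ess(i, s):
--         return len(s[:i + 1].split('.')[-1]) <= 2
--
--     i = 0
--     while len(mod_name) > 20 and i < len(mod_name):
--         if is_ess(i, mod_name):
--             i += 1
--             continue
--         mod_name = mod_name[:i] + mod_name[i + 1:]
--
--     mod_name = ' ' * (20 - len(mod_name)) + mod_name
--
--     return mod_name
-- ===== SOURCE B (Python) =====
-- def _shorten_mod(mod_name):
--     to_delete = len(mod_name) - 20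
--     out = []
--     seg = 0
--     for c in mod_name:
--         if c == '.':
--             out.append(c)
--             seg = 0
--         elif seg < 2 or to_delete <= 0:
--             out.append(c)
--             seg += 1
--         else:
--             to_delete -= 1
--     s = ''.join(out)
--     return ' ' * (20 - len(s)) + s
-- ===== Notes on version B (the rewrite author's own statement) =====
-- stated objective: faster
-- what changed: A repeatedly rescans and re-splits the prefix of the string after every single-character deletion; B makes one left-to-right pass tracking the kept length of the current dot-segment and the remaining number of deletions, building the result once.
import Mathlib
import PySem

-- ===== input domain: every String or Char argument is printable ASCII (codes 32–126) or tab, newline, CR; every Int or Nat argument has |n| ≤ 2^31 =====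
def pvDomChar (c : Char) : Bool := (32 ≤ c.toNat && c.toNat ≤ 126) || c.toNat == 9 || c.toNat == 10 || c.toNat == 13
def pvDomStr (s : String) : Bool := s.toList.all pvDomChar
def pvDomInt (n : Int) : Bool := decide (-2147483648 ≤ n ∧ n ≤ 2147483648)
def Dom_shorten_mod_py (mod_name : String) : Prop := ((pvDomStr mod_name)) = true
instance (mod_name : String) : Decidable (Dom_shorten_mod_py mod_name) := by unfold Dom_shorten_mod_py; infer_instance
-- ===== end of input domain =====

-- B replaces A's delete-and-rescan while-loop (which re-splits a prefix at every step) by a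
-- single left-to-right pass tracking the kept length of the current dot-segment (objective: faster).


-- ===== PORT A =====
-- is_ess(i, s): len(s[:i + 1].split('.')[-1]) <= 2
-- (split('.') always returns a nonempty list, so Python's [-1] never raises; the .getD [] is dead)
def pvIsEssA (i : Nat) (s : List Char) : Bool :=
  decide (((PySem.List.pyGet?
      (PySem.Chars.splitOn (PySem.List.slice s none (some ((i : Int) + 1))) ['.'])
      (-1)).getD []).length ≤ 2)

-- the while-loop: i advances past essential positions, otherwise the char at i is dropped
def pvLoopA (s : List Char) (i : Nat) : List Char :=
  if h : 20 < s.length ∧ i < s.length then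
    if pvIsEssA i s then pvLoopA s (i + 1)
    else pvLoopA (PySem.List.slice s none (some (i : Int)) ++
                  PySem.List.slice s (some ((i : Int) + 1)) none) i
  else s
termination_by 2 * s.length - i
decreasing_by
  · omega
  · have h1 : PySem.List.slice s none (some (i : Int)) = s.take i :=
      PySem.List.slice_to_natCast s i
    have h2 : PySem.List.slice s (some ((i : Int) + 1)) none = s.drop (i + 1) := by
      have := PySem.List.slice_from_natCast s (i + 1)
      push_cast at this
      exact this
    simp [h1, h2]
    omega

def shorten_mod_py (mod_name : String) : String :=
  let cs := pvLoopA mod_name.toList 0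
  String.ofList (List.replicate (20 - cs.length) ' ' ++ cs)

-- ===== PORT B =====
-- state: (kept chars, kept length of the current dot-segment, deletions still needed)
def pvStepB (st : List Char × Nat × Int) (c : Char) : List Char × Nat × Int :=
  if c = '.' then (st.1 ++ [c], 0, st.2.2)
  else if st.2.1 < 2 ∨ st.2.2 ≤ 0 then (st.1 ++ [c], st.2.1 + 1, st.2.2)
  else (st.1, st.2.1, st.2.2 - 1)

def shorten_mod_py_alt (mod_name : String) : String :=
  let st := mod_name.toList.foldl pvStepB ([], 0, (mod_name.toList.length : Int) - 20)
  String.ofList (List.replicate (20 - st.1.length) ' ' ++ st.1)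

-- ===== PRECONDITION & SPEC =====
def Spec_shorten_mod_py (mod_name : String) (out : String) : Prop := out = shorten_mod_py_alt mod_name
instance (mod_name : String) (out : String) : Decidable (Spec_shorten_mod_py mod_name out) := by unfold Spec_shorten_mod_py; infer_instance

-- ===== CLAIM (what is proved, stated in full; the proofs are below) =====
def Claim_equal_shorten_mod_py : Prop := ∀ (mod_name : String), Dom_shorten_mod_py mod_name → Spec_shorten_mod_py mod_name (shorten_mod_py mod_name)

-- ===== LEMMAS AND PROOFS =====

-- the last '.'-separated segment of a list (the whole list if it has no '.')
def pvSeg : List Char → List Char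
  | [] => []
  | c :: r => if c = '.' ∨ '.' ∈ r then pvSeg r else c :: r

-- the chars B keeps (pvStepB without the output accumulator)
def pvKeep : List Char → Nat → Int → List Char
  | [], _, _ => []
  | c :: r, seg, td =>
    if c = '.' then c :: pvKeep r 0 td
    else if seg < 2 ∨ td ≤ 0 then c :: pvKeep r (seg + 1) td
    else pvKeep r seg (td - 1)

theorem pvGet_neg_one {α : Type} (l : List α) : PySem.List.pyGet? l (-1) = l.getLast? := by
  cases l with
  | nil => simp [PySem.List.pyGet?, PySem.List.pyIdx?]
  | cons a r =>
    simp [PySem.List.pyGet?, PySem.List.pyIdx?, List.getLast?_eq_getElem?]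

theorem pvSeg_of_not_mem (l : List Char) (h : '.' ∉ l) : pvSeg l = l := by
  induction l with
  | nil => rfl
  | cons c r ih =>
    simp at h
    simp [pvSeg, h.1, Ne.symm h.1, h.2, ih h.2]

theorem pvGo_getLast (fuel : Nat) (l cur : List Char) (acc : List (List Char)) (h : l.length ≤ fuel) :
    (PySem.Chars.splitOn.go ['.'] fuel l cur acc).getLast? =
      some (if '.' ∈ l then pvSeg l else cur.reverse ++ l) := by
  induction fuel generalizing l cur acc with
  | zero =>
    have : l = [] := by cases l <;> simp_all
    subst this
    simp [PySem.Chars.splitOn.go]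
  | succ fuel ih =>
    cases l with
    | nil => simp [PySem.Chars.splitOn.go]
    | cons c rest =>
      simp only [PySem.Chars.splitOn.go]
      by_cases hc : c = '.'
      · subst hc
        have hpre : List.isPrefixOf ['.'] ('.' :: rest) = true := by simp [List.isPrefixOf]
        rw [if_pos hpre]
        simp only [List.length_cons, List.length_nil, List.length_singleton,
          List.drop_succ_cons, List.drop_zero] at h ⊢
        rw [ih rest [] _ (by omega)]
        by_cases hr : '.' ∈ rest
        · simp [pvSeg, hr]
        · simp [pvSeg, hr, pvSeg_of_not_mem rest hr]
      · have hpre : List.isPrefixOf ['.'] (c :: rest) = false := by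
          simp [List.isPrefixOf]; exact fun h => absurd h.symm hc
        rw [if_neg (by simp [hpre])]
        simp only [List.length_cons] at h
        rw [ih rest (c :: cur) _ (by omega)]
        by_cases hr : '.' ∈ rest
        · simp [pvSeg, hr, hc]
        · simp [pvSeg, hr, hc, Ne.symm hc]

theorem pvSplitOn_last (l : List Char) :
    (PySem.Chars.splitOn l ['.']).getLast? = some (pvSeg l) := by
  rw [PySem.Chars.splitOn, pvGo_getLast (l.length + 1) l [] [] (by omega)]
  by_cases hr : '.' ∈ l
  · simp [hr]
  · simp [hr, pvSeg_of_not_mem l hr]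

theorem pvSeg_concat (l : List Char) (c : Char) :
    pvSeg (l ++ [c]) = if c = '.' then [] else pvSeg l ++ [c] := by
  induction l with
  | nil => by_cases h : c = '.' <;> simp [pvSeg, h]
  | cons d r ih =>
    by_cases hc : c = '.'
    · simp only [hc] at ih ⊢
      simp [pvSeg, ih]
    · simp only [List.cons_append, pvSeg, List.mem_append, List.mem_singleton]
      by_cases hd : d = '.' ∨ '.' ∈ r
      · have : (d = '.' ∨ '.' ∈ r ∨ '.' = c) := by tauto
        simp [pvSeg, hd, hc, this, ih, Ne.symm hc]
      · simp [pvSeg, hd, hc, ih]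
        rintro (h | h | h)
        · exact absurd (Or.inl h) hd
        · exact absurd (Or.inr h) hd
        · exact absurd h.symm hc

theorem pvKeep_of_nonpos (cs : List Char) (seg : Nat) (td : Int) (h : td ≤ 0) :
    pvKeep cs seg td = cs := by
  induction cs generalizing seg with
  | nil => rfl
  | cons c r ih => simp [pvKeep, h, ih]

theorem pvFoldl_keep (cs : List Char) (out : List Char) (seg : Nat) (td : Int) :
    (cs.foldl pvStepB (out, seg, td)).1 = out ++ pvKeep cs seg td := by
  induction cs generalizing out seg td with
  | nil => simp [pvKeep]
  | cons c r ih =>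
    simp only [List.foldl_cons, pvStepB, pvKeep]
    by_cases h1 : c = '.'
    · simp [h1, ih]
    · by_cases h2 : seg ≤ 1 ∨ td ≤ 0
      · simp [h1, h2, ih]
      · simp [h1, h2, ih]

theorem pvIsEssA_eq (done rest : List Char) (c : Char) :
    pvIsEssA done.length (done ++ c :: rest) =
      decide ((pvSeg (done ++ [c])).length ≤ 2) := by
  unfold pvIsEssA
  have hs : PySem.List.slice (done ++ c :: rest) none (some ((done.length : Int) + 1))
      = done ++ [c] := by
    have := PySem.List.slice_to_natCast (done ++ c :: rest) (done.length + 1)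
    push_cast at this
    rw [this]
    rw [List.take_append]
    simp
  rw [hs, pvGet_neg_one, pvSplitOn_last]
  simp

theorem pvLoopA_keep (rest done : List Char) :
    pvLoopA (done ++ rest) done.length =
      done ++ pvKeep rest (pvSeg done).length ((done.length : Int) + rest.length - 20) := by
  induction rest generalizing done with
  | nil =>
    rw [pvLoopA]
    have hno : ¬(20 < (done ++ ([] : List Char)).length ∧
        done.length < (done ++ ([] : List Char)).length) := by simp
    rw [dif_neg hno]
    simp [pvKeep]
  | cons c rest ih =>
    rw [pvLoopA]
    by_cases hlen : 20 < done.length + (rest.length + 1)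
    · have hcond : 20 < (done ++ c :: rest).length ∧ done.length < (done ++ c :: rest).length := by
        simp; omega
      rw [dif_pos hcond, pvIsEssA_eq done rest c]
      by_cases hc : c = '.'
      · subst hc
        have hess : decide ((pvSeg (done ++ ['.'])).length ≤ 2) = true := by
          simp [pvSeg_concat]
        rw [if_pos hess]
        have h1 : done ++ '.' :: rest = (done ++ ['.']) ++ rest := by simp
        have h2 : done.length + 1 = (done ++ ['.']).length := by simp
        rw [h1, h2, ih (done ++ ['.'])]
        simp [pvKeep, pvSeg_concat]
        congr 1; ring
      · by_cases hess : (pvSeg (done ++ [c])).length ≤ 2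
        · rw [if_pos (by simpa using hess)]
          have h1 : done ++ c :: rest = (done ++ [c]) ++ rest := by simp
          have h2 : done.length + 1 = (done ++ [c]).length := by simp
          rw [h1, h2, ih (done ++ [c])]
          have hseg : (pvSeg (done ++ [c])).length = (pvSeg done).length + 1 := by
            simp [pvSeg_concat, hc]
          have hlt : (pvSeg done).length < 2 := by omega
          simp [pvKeep, hc, hlt, hseg]
          congr 1; ring
        · rw [if_neg (by simpa using hess)]
          have hsl : PySem.List.slice (done ++ c :: rest) none (some ((done.length : Int))) ++
              PySem.List.slice (done ++ c :: rest) (some ((done.length : Int) + 1)) none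
              = done ++ rest := by
            rw [PySem.List.slice_to_natCast]
            have := PySem.List.slice_from_natCast (done ++ c :: rest) (done.length + 1)
            push_cast at this
            rw [this, List.take_append, List.drop_append]
            simp
          rw [hsl, ih done]
          have hseg2 : ¬((pvSeg done).length < 2) := by
            simp [pvSeg_concat, hc] at hess; omega
          simp only [pvKeep, if_neg hc, List.length_cons]
          rw [if_neg (by push_neg; exact ⟨by omega, by push_cast; omega⟩)]
          congr 2
          push_cast; ring
    · have hno : ¬(20 < (done ++ c :: rest).length ∧ done.length < (done ++ c :: rest).length) := by
        simp; omega
      rw [dif_neg hno]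
      rw [pvKeep_of_nonpos _ _ _ (by simp; omega)]

-- ===== VERDICT (by name: the statement is the Claim_ definition above) =====
theorem shorten_mod_py_spec : Claim_equal_shorten_mod_py := by
  intro m _
  unfold Spec_shorten_mod_py shorten_mod_py shorten_mod_py_alt
  have h1 : pvLoopA m.toList 0 = pvKeep m.toList 0 ((m.toList.length : Int) - 20) := by
    have := pvLoopA_keep m.toList []
    simpa [pvSeg] using this
  have h2 := pvFoldl_keep m.toList [] 0 ((m.toList.length : Int) - 20)
  simp only [List.nil_append] at h2
  simp at h2
  simp [h1, h2]
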